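-- pv_equiv track=rewrite | github.com/kuznetsovvj/education | algorithms/codeforces/1397a.py | check
-- ===== SOURCE A (Python) =====
-- from collections import defaultdict
--
-- def check(words):
--     x = defaultdict(int)
--     for w in words:
--         for i in w:
--             x[i] += 1
--     res = True
--     for v in x.values():
--         if v % len(words) != 0:
--             res = False
--     if res:
--         return "YES"
--     return "NO"
-- ===== SOURCE B (Python) =====
-- def check(words):
--     if not words:
--         return "YES"
--     n = len(words)
--     s = sorted("".join(words))
--     i = 0
--     while i < len(s):
--         j = i
--         while j < len(s) and s[j] == s[i]:
--             j += 1
--         if (j - i) % n != 0: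
--             return "NO"
--         i = j
--     return "YES"
-- ===== Notes on version B (the rewrite author's own statement) =====
-- stated objective: alternative
-- what changed: Replaces hash-based counting (defaultdict built over a double loop, then a flag loop over its values) with sort-then-scan: sort the joined characters and walk the sorted list measuring each maximal run, returning NO early on the first run whose length is not divisible by len(words).
import Mathlib
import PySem

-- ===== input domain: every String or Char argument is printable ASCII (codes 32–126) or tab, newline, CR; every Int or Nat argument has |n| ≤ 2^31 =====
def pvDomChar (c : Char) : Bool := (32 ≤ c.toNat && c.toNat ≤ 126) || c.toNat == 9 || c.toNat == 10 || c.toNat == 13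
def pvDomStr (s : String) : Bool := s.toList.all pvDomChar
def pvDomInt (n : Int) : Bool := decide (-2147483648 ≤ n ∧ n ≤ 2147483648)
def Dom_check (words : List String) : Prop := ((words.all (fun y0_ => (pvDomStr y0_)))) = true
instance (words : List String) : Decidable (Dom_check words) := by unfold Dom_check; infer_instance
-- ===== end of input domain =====

-- B replaces the hash-counter-plus-flag-loop with sort-then-scan: sort the joined letters and
-- check each maximal run's length for divisibility by len(words), with an early NO (alternative algorithm, not faster).

-- ===== PORT A =====
def check (words : List String) : String :=
  -- x = defaultdict(int); for w in words: for i in w: x[i] += 1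
  let x : PySem.Dict Char Int :=
    words.foldl (fun d w => w.toList.foldl (fun d c => d.modify c 0 (· + 1)) d) PySem.Dict.empty
  -- res = True; for v in x.values(): if v % len(words) != 0: res = False
  let res : Bool :=
    x.values.foldl (fun r v => if PySem.Int.mod v (words.length : Int) ≠ 0 then false else r) true
  if res then "YES" else "NO"

-- ===== PORT B =====
-- the outer while-loop of Source B: consume one maximal run per step (inner 'while s[j] == s[i]'
-- = takeWhile; 'i = j' = dropWhile), test its length, early "NO"
def runScan (n : Int) : List Char → String
  | [] => "YES"
  | c :: t =>
      if PySem.Int.mod ((1 + (t.takeWhile (· == c)).length : Nat) : Int) n ≠ 0 then "NO"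
      else runScan n (t.dropWhile (· == c))
  termination_by l => l.length
  decreasing_by
    exact Nat.lt_succ_of_le (List.length_dropWhile_le _ _)

def check_alt (words : List String) : String :=
  if words = [] then "YES"
  else runScan (words.length : Int)
        (PySem.List.sorted (PySem.Str.join "" words).toList (fun x => x) false)

-- ===== PRECONDITION & SPEC =====
def Spec_check (words : List String) (out : String) : Prop := out = check_alt words
instance (words : List String) (out : String) : Decidable (Spec_check words out) := by unfold Spec_check; infer_instance

-- ===== CLAIM (what is proved, stated in full; the proofs are below) =====
def Claim_equal_check : Prop := ∀ (words : List String), Dom_check words → Spec_check words (check words)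

-- ===== LEMMAS AND PROOFS =====

-- "".join(words) concatenates the words' characters
lemma join_nil_flatten (l : List (List Char)) : PySem.Chars.join [] l = l.flatten := by
  induction l with
  | nil => rfl
  | cons a t ih => cases t with
    | nil => simp [PySem.Chars.join, List.intercalate]
    | cons b u => rw [PySem.Chars.join_cons_cons]; simp_all [PySem.Chars.join]

-- the counter's values are the per-distinct-character counts
lemma values_counter (flat : List Char) :
    PySem.Dict.values (PySem.Dict.counter flat)
      = (PySem.Set.ofList flat).map (fun k => ((flat.count k : Int))) := by
  rw [PySem.Dict.values, PySem.Dict.items_counter, List.map_map]; rfl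

-- A's flag loop: the result is true iff no value fails the test
lemma foldl_flag (p : Int → Prop) [DecidablePred p] (l : List Int) (b : Bool) :
    l.foldl (fun r v => if p v then false else r) b = (b && l.all (fun v => !decide (p v))) := by
  induction l generalizing b with
  | nil => simp
  | cons v t ih =>
      simp only [List.foldl_cons, List.all_cons, ih]
      by_cases h : p v <;> simp [h]

-- in a sorted list headed by c, the run `c :: takeWhile (==c) t` holds every copy of c
lemma not_mem_dropWhile (c : Char) (t : List Char)
    (hs : (c :: t).Pairwise (· ≤ ·)) : c ∉ t.dropWhile (· == c) := by
  intro hmem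
  rcases hd : t.dropWhile (· == c) with _ | ⟨d, r⟩
  · rw [hd] at hmem; exact List.not_mem_nil hmem
  · have hdt : d ∈ t := (List.dropWhile_sublist _).mem (by rw [hd]; exact List.mem_cons_self)
    have hcd : c ≤ d := (List.pairwise_cons.mp hs).1 d hdt
    have hdc : d ≠ c := by
      have := List.head_dropWhile_not (p := fun x => x == c) (l := t) (w := by simp [hd])
      simpa [hd] using this
    rw [hd] at hmem
    rcases List.mem_cons.mp hmem with h | h
    · exact hdc h.symm
    · -- c after d in the sorted tail: d ≤ c, but c ≤ d and d ≠ c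
      have hp : (t.dropWhile (· == c)).Pairwise (· ≤ ·) :=
        (List.pairwise_cons.mp hs).2.sublist (List.dropWhile_sublist _)
      rw [hd] at hp
      have : d ≤ c := (List.pairwise_cons.mp hp).1 c h
      exact hdc (le_antisymm this hcd)

lemma count_head_run (c : Char) (t : List Char) (hs : (c :: t).Pairwise (· ≤ ·)) :
    (c :: t).count c = 1 + (t.takeWhile (· == c)).length := by
  have hsplit := List.takeWhile_append_dropWhile (p := (· == c)) (l := t)
  have htake : (t.takeWhile (· == c)).count c = (t.takeWhile (· == c)).length := by
    apply List.count_eq_length.mpr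
    intro x hx
    exact (eq_of_beq (List.mem_takeWhile_imp (p := fun y => y == c) hx)).symm
  have hdrop : (t.dropWhile (· == c)).count c = 0 :=
    List.count_eq_zero.mpr (not_mem_dropWhile c t hs)
  calc (c :: t).count c = t.count c + 1 := by simp
    _ = ((t.takeWhile (· == c)) ++ (t.dropWhile (· == c))).count c + 1 := by rw [hsplit]
    _ = 1 + (t.takeWhile (· == c)).length := by
        rw [List.count_append, htake, hdrop]; omega

lemma count_tail_of_ne (c x : Char) (t : List Char) (hx : x ≠ c) :
    (t.dropWhile (· == c)).count x = (c :: t).count x := by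
  have hsplit := List.takeWhile_append_dropWhile (p := (· == c)) (l := t)
  have htake : (t.takeWhile (· == c)).count x = 0 := by
    apply List.count_eq_zero.mpr
    intro hmem
    exact hx (eq_of_beq (List.mem_takeWhile_imp (p := fun y => y == c) hmem))
  have hcnt : t.count x = (t.takeWhile (· == c)).count x + (t.dropWhile (· == c)).count x := by
    conv_lhs => rw [← hsplit]
    exact List.count_append ..
  have hx2 : ¬ c = x := fun h => hx h.symm
  have hcc : (c :: t).count x = t.count x := by simp [hx2]
  rw [hcc, hcnt, htake]
  omega

-- run-length scan on a sorted list decides "all character counts divisible"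
lemma runScan_eq (n : Int) (l : List Char) (hs : l.Pairwise (· ≤ ·)) :
    runScan n l =
      if ∀ c ∈ l, PySem.Int.mod (l.count c : Int) n = 0 then "YES" else "NO" := by
  induction l using runScan.induct n with
  | case1 => simp [runScan]
  | case2 c t hmod =>
      rw [runScan, if_pos hmod]
      have hc : ((c :: t).count c : Int) = ((1 + (t.takeWhile (· == c)).length : Nat) : Int) := by
        rw [count_head_run c t hs]
      rw [if_neg]
      intro hall
      exact hmod (by rw [← hc]; exact hall c (List.mem_cons_self))
  | case3 c t hmod ih =>
      rw [runScan, if_neg hmod]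
      rw [not_not] at hmod
      have hs' : (t.dropWhile (· == c)).Pairwise (· ≤ ·) :=
        (List.pairwise_cons.mp hs).2.sublist (List.dropWhile_sublist _)
      rw [ih hs']
      have hcnt : PySem.Int.mod (((c :: t).count c : Int)) n = 0 := by
        rw [count_head_run c t hs]; exact_mod_cast hmod
      congr 1
      apply propext
      constructor
      · intro h x hx
        by_cases hxc : x = c
        · subst hxc; exact hcnt
        · rcases List.mem_cons.mp hx with he | hxt
          · exact absurd he hxc
          · rw [← count_tail_of_ne c x t hxc]
            apply h
            have hsplit : x ∈ t.takeWhile (· == c) ++ t.dropWhile (· == c) := by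
              rw [List.takeWhile_append_dropWhile]; exact hxt
            rcases List.mem_append.mp hsplit with hm | hm
            · exact absurd (eq_of_beq (List.mem_takeWhile_imp (p := fun y => y == c) hm)) hxc
            · exact hm
      · intro h x hx
        have hxt : x ∈ t := (List.dropWhile_sublist _).mem hx
        have hxc : x ≠ c := fun he => not_mem_dropWhile c t hs (he ▸ hx)
        rw [count_tail_of_ne c x t hxc]
        exact h x (List.mem_cons_of_mem _ hxt)

-- ===== VERDICT (by name: the statement is the Claim_ definition above) =====
theorem check_spec : Claim_equal_check := by
  intro words _
  unfold Spec_check check check_alt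
  by_cases hw : words = []
  · subst hw; decide
  · have h1 : words.foldl (fun d w => w.toList.foldl
        (fun d c => d.modify c 0 (· + 1)) d) PySem.Dict.empty
        = PySem.Dict.counter ((words.map String.toList).flatten) := by
      rw [PySem.Dict.counter_eq_foldl, List.foldl_flatten, List.foldl_map]
    have h2 : (PySem.Str.join "" words).toList = (words.map String.toList).flatten := by
      simp only [PySem.Str.toList_join, String.toList_empty, join_nil_flatten]
    have hsp : (PySem.List.sorted ((words.map String.toList).flatten)
        (fun x => x) false).Pairwise (· ≤ ·) := by
      simpa using PySem.List.sorted_pairwise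
        (xs := (words.map String.toList).flatten) (key := fun x => x)
    have hperm : (PySem.List.sorted ((words.map String.toList).flatten)
        (fun x => x) false).Perm ((words.map String.toList).flatten) :=
      PySem.List.sorted_perm ..
    simp only [if_neg hw, h1, h2, values_counter, foldl_flag, Bool.true_and]
    rw [runScan_eq _ _ hsp]
    have hiff : (∀ c ∈ PySem.List.sorted ((words.map String.toList).flatten) (fun x => x) false,
          PySem.Int.mod (((PySem.List.sorted ((words.map String.toList).flatten)
            (fun x => x) false).count c : Int)) (words.length : Int) = 0)
        ↔ ((PySem.Set.ofList ((words.map String.toList).flatten)).map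
            (fun k => (((words.map String.toList).flatten.count k : Int)))).all
            (fun v => !decide (PySem.Int.mod v (words.length : Int) ≠ 0)) = true := by
      simp only [List.all_map, List.all_eq_true, Function.comp_def, Bool.not_eq_eq_eq_not,
        Bool.not_true, decide_eq_false_iff_not, not_not, PySem.Set.mem_ofList]
      constructor
      · intro h k hk
        rw [← hperm.count_eq]
        exact h k ((PySem.List.mem_sorted ..).mpr hk)
      · intro h c hc
        rw [hperm.count_eq]
        exact h c ((PySem.List.mem_sorted ..).mp hc)
    by_cases hall : ∀ c ∈ PySem.List.sorted ((words.map String.toList).flatten)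
        (fun x => x) false,
        PySem.Int.mod (((PySem.List.sorted ((words.map String.toList).flatten)
          (fun x => x) false).count c : Int)) (words.length : Int) = 0
    · rw [if_pos (hiff.mp hall), if_pos hall]
    · rw [if_neg (fun hb => hall (hiff.mpr hb)), if_neg hall]
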